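-- pv_equiv track=rewrite | github.com/hhwwan/Algorithm | programmers/LV.1/붕대 감기.py | solution
-- ===== SOURCE A (Python) =====
-- def solution(bandage, health, attacks):
--     sequence = 0
--     monster = 0
--     maximum = health
--     for second in range(attacks[-1][0]+1):
--         # 체력 회복을 했는데 최대 체력보다 높을 경우 최대체력으로 초기화
--         if health > maximum:
--             health = maximum
--         # 몬스터 공격 시
--         if second == attacks[monster][0]:
--             health -= attacks[monster][1]
--             sequence = 0 # 연속 회복 시간 초기화
--             monster += 1
--             if health <= 0: # 체력 0이하로 내려가면 -1 출력 후 종료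
--                 return -1
--         # 최대 체력보다 체력 작으면
--         elif health < maximum:
--             health += bandage[1] # 초당 체력 회복
--             sequence += 1 # 연속 체력 회복 시간
--             if sequence == bandage[0]: # 추가 회복량 시간 달성
--                 health += bandage[2]
--                 sequence = 0 # 연속 회복 시간 초기화
--
--     return health
-- ===== SOURCE B (Python) =====
-- def heal(bandage, health, maximum, gap):
--     # gap attack-free seconds: each heals bandage[1], plus bandage[2] per full
--     # streak of bandage[0] seconds, capped at maximum; nothing to do at full health
--     if gap <= 0 or health >= maximum:
--         return health
--     return min(maximum, health + gap * bandage[1] + gap // bandage[0] * bandage[2])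
--
--
-- def solution(bandage, health, attacks):
--     maximum = health
--     last = attacks[-1][0]
--     prev = 0  # first second not yet accounted for
--     for atk in attacks:
--         if prev > last:
--             break
--         time = atk[0]
--         if time < prev or time > last:
--             break  # this attack never lands, so no later one can either
--         health = heal(bandage, health, maximum, time - prev)
--         health -= atk[1]
--         if health <= 0:
--             return -1
--         prev = time + 1
--     return heal(bandage, health, maximum, last - prev + 1)
-- ===== Notes on version B (the rewrite author's own statement) =====
-- stated objective: alternative
-- what changed: A simulates every second up to the last attack time, healing one tick at a time; B iterates once over the attacks, stops as soon as an attack can no longer land, and computes each inter-attack gap's healing with the closed form min(max, health + gap*bandage[1] + gap//bandage[0]*bandage[2]). …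
-- outside the precondition, e.g. on solution([0, 1, 1], 5, [[0, 2], [2, 1]]): A returns 3, B raises ZeroDivisionError; on solution([2, -2, 7], 10, [[1, 5], [7, 0]]): A returns 10, B returns 9; on solution([1, 1, 1], 5, [[1, -5], [3, 2]]): A returns 3, B returns 8
import Mathlib
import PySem

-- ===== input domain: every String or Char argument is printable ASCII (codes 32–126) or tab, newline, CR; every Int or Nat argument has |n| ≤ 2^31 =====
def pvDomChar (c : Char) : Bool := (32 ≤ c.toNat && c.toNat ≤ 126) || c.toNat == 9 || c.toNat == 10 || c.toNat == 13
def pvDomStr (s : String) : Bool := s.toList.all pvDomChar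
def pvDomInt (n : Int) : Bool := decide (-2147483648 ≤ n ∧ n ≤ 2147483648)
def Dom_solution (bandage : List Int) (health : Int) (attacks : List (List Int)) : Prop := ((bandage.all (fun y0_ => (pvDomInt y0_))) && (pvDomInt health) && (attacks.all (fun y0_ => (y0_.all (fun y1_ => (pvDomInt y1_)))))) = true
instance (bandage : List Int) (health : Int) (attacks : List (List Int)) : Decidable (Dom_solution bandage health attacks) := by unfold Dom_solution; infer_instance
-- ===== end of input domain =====

-- B replaces A's second-by-second simulation by one step per attack, computing each
-- attack-free gap's healing with the closed form min(max, health + gap*x + gap//t*y)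
-- and stopping at the first attack that cannot land.

-- ===== PORT A =====
-- A's for-loop over range(attacks[-1][0]+1); state: health, sequence, monster.
-- Where Python raises IndexError (pyGet? = none) the .getD default is taken; Pre_ excludes those inputs.
def solGoA (bandage : List Int) (maximum : Int) (attacks : List (List Int)) :
    List Int → Int → Int → Int → Int
  | [], health, _, _ => health
  | second :: rest, health, sequence, monster =>
      -- if health > maximum: health = maximum
      let health := if maximum < health then maximum else health
      let atk := (PySem.List.pyGet? attacks monster).getD []
      if second = (PySem.List.pyGet? atk 0).getD 0 then
        -- monster attack second
        let health := health - (PySem.List.pyGet? atk 1).getD 0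
        if health ≤ 0 then -1
        else solGoA bandage maximum attacks rest health 0 (monster + 1)
      else if health < maximum then
        -- per-second heal, plus the bonus every bandage[0] consecutive seconds
        let health := health + (PySem.List.pyGet? bandage 1).getD 0
        let sequence := sequence + 1
        if sequence = (PySem.List.pyGet? bandage 0).getD 0 then
          solGoA bandage maximum attacks rest (health + (PySem.List.pyGet? bandage 2).getD 0) 0 monster
        else
          solGoA bandage maximum attacks rest health sequence monster
      else
        solGoA bandage maximum attacks rest health sequence monster

def solution (bandage : List Int) (health : Int) (attacks : List (List Int)) : Int :=
  let lastTime := (PySem.List.pyGet? ((PySem.List.pyGet? attacks (-1)).getD []) 0).getD 0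
  solGoA bandage health attacks (PySem.List.pyRange 0 (lastTime + 1) 1) health 0 0

-- ===== PORT B =====
-- Source B's heal helper: gap attack-free seconds, capped at maximum
def healAlt (bandage : List Int) (health maximum gap : Int) : Int :=
  if gap ≤ 0 ∨ maximum ≤ health then health
  else min maximum (health + gap * (PySem.List.pyGet? bandage 1).getD 0
    + PySem.Int.floordiv gap ((PySem.List.pyGet? bandage 0).getD 0)
      * (PySem.List.pyGet? bandage 2).getD 0)

-- Source B's for-loop over the attacks; both 'break's jump to the trailing heal
def altGo (bandage : List Int) (maximum last : Int) : List (List Int) → Int → Int → Int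
  | [], health, prev => healAlt bandage health maximum (last - prev + 1)
  | atk :: rest, health, prev =>
      if last < prev then healAlt bandage health maximum (last - prev + 1)
      else
        let time := (PySem.List.pyGet? atk 0).getD 0
        if time < prev ∨ last < time then healAlt bandage health maximum (last - prev + 1)
        else
          let health := healAlt bandage health maximum (time - prev)
            - (PySem.List.pyGet? atk 1).getD 0
          if health ≤ 0 then -1 else altGo bandage maximum last rest health (time + 1)

def solution_alt (bandage : List Int) (health : Int) (attacks : List (List Int)) : Int :=
  let last := (PySem.List.pyGet? ((PySem.List.pyGet? attacks (-1)).getD []) 0).getD 0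
  altGo bandage health last attacks health 0

-- ===== PRECONDITION & SPEC =====
-- Pre_ excludes the inputs around which A raises IndexError (empty attacks, an empty last or
-- first entry, short entries/bandage that the loop reaches) and, on inputs where some attack
-- actually lands, restricts to the problem's stated domain — attacks are [time, damage] pairs
-- with strictly increasing nonnegative times and nonnegative damage, bandage is [t, x, y] with
-- t ≥ 1 and x, y ≥ 0 — where alone B's per-gap closed form is the specified healing (outside
-- it B raises ZeroDivisionError for t = 0 or values the gaps differently, see claim.json).
-- Inputs whose first attack can never land (time negative or past the last attack's time) are
-- kept without any shape demands: A returns health untouched there.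
def Pre_solution (bandage : List Int) (health : Int) (attacks : List (List Int)) : Prop :=
  attacks ≠ [] ∧ (attacks.getLast?.getD []) ≠ [] ∧
  ((attacks.getLast?.getD []).headD 0 < 0
    ∨ (attacks.headD [] ≠ [] ∧ ((attacks.headD []).headD 0 < 0
        ∨ (attacks.getLast?.getD []).headD 0 < (attacks.headD []).headD 0))
    ∨ (0 ≤ (attacks.headD []).headD 0
        ∧ List.Pairwise (fun a b => a.headD 0 < b.headD 0) attacks
        ∧ (∀ a ∈ attacks, 2 ≤ a.length ∧ 0 ≤ (a.drop 1).headD 0)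
        ∧ 3 ≤ bandage.length ∧ 1 ≤ bandage.headD 0
        ∧ 0 ≤ (bandage.drop 1).headD 0 ∧ 0 ≤ (bandage.drop 2).headD 0))
instance (bandage : List Int) (health : Int) (attacks : List (List Int)) : Decidable (Pre_solution bandage health attacks) := by unfold Pre_solution; infer_instance

def pvWitness_solution : List Int × Int × List (List Int) := ([1, 1, 1], 5, [[1, 2], [3, 2]])

def Spec_solution (bandage : List Int) (health : Int) (attacks : List (List Int)) (out : Int) : Prop := out = solution_alt bandage health attacks
instance (bandage : List Int) (health : Int) (attacks : List (List Int)) (out : Int) : Decidable (Spec_solution bandage health attacks out) := by unfold Spec_solution; infer_instance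

-- ===== CLAIM (what is proved, stated in full; the proofs are below) =====
def Claim_equal_solution : Prop := ∀ (bandage : List Int) (health : Int) (attacks : List (List Int)), Dom_solution bandage health attacks → Pre_solution bandage health attacks → Spec_solution bandage health attacks (solution bandage health attacks)

-- ===== LEMMAS AND PROOFS =====

-- reference second-by-second gap semantics (one attack-free second: clamp, then heal if below max)
def specGap (maximum t x y : Int) : Nat → Int → Int → Int
  | 0, h, _ => h
  | g + 1, h, s =>
      let h1 := if maximum < h then maximum else h
      if h1 < maximum then
        let h2 := h1 + x
        let s2 := s + 1
        if s2 = t then specGap maximum t x y g (h2 + y) 0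
        else specGap maximum t x y g h2 s2
      else specGap maximum t x y g h1 s

-- heal amount of g consecutive healing seconds starting at sequence s
def amtF (t x y s : Int) (g : Nat) : Int :=
  (g : Int) * x + ((s + (g : Int)) / t - s / t) * y

lemma amtF_zero (t x y s : Int) : amtF t x y s 0 = 0 := by
  unfold amtF; simp

lemma amtF_one (t x y s : Int) (ht : 1 ≤ t) (hs : 0 ≤ s) (hst : s < t) :
    amtF t x y s 1 = x + (if s + 1 = t then y else 0) := by
  unfold amtF
  have hz : s / t = 0 := Int.ediv_eq_zero_of_lt hs hst
  by_cases h2 : s + 1 = t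
  · rw [if_pos h2, hz]
    push_cast
    rw [show s + (1 : Int) = t from h2, Int.ediv_self (by omega : t ≠ 0)]
    ring
  · rw [if_neg h2, hz]
    push_cast
    rw [Int.ediv_eq_zero_of_lt (by omega) (by omega : s + 1 < t)]
    ring

lemma amtF_shift (t x y s : Int) (ht : 1 ≤ t) (hs : 0 ≤ s) (hst : s < t) (g : Nat) :
    amtF t x y s (g + 1)
      = amtF t x y s 1 + amtF t x y (if s + 1 = t then 0 else s + 1) g := by
  unfold amtF
  have hz : s / t = 0 := Int.ediv_eq_zero_of_lt hs hst
  by_cases h2 : s + 1 = t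
  · rw [if_pos h2, hz]
    push_cast
    rw [show s + ((g : Int) + 1) = (g : Int) + 1 * t from by omega,
      Int.add_mul_ediv_right _ _ (by omega : t ≠ 0),
      show s + (1 : Int) = t from h2, Int.ediv_self (by omega : t ≠ 0)]
    simp only [zero_add, Int.zero_ediv]
    ring
  · rw [if_neg h2, hz]
    push_cast
    rw [Int.ediv_eq_zero_of_lt (by omega) (by omega : s + 1 < t),
      show s + ((g : Int) + 1) = s + 1 + (g : Int) from by ring]
    ring

lemma amtF_nonneg (t x y s : Int) (ht : 1 ≤ t) (hx : 0 ≤ x) (hy : 0 ≤ y) (g : Nat) :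
    0 ≤ amtF t x y s g := by
  unfold amtF
  have h1 : s / t ≤ (s + (g : Int)) / t :=
    Int.ediv_le_ediv (by omega : (0 : Int) < t) (by omega)
  have h2 : 0 ≤ (g : Int) * x := mul_nonneg (by positivity) hx
  have h3 : 0 ≤ ((s + (g : Int)) / t - s / t) * y := mul_nonneg (by omega) hy
  omega

lemma specGap_max (maximum t x y : Int) :
    ∀ (g : Nat) (s : Int), specGap maximum t x y g maximum s = maximum := by
  intro g
  induction g with
  | zero => intro s; rfl
  | succ g ih =>
    intro s
    simp only [specGap]
    rw [if_neg (lt_irrefl maximum), if_neg (lt_irrefl maximum)]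
    exact ih s

-- the clamped value after g attack-free seconds equals the clamped closed form
lemma clamp_gap (maximum t x y : Int) (ht : 1 ≤ t) (hx : 0 ≤ x) (hy : 0 ≤ y) :
    ∀ (g : Nat) (h s : Int), 0 ≤ s → s < t →
      min maximum (specGap maximum t x y g h s) = min maximum (h + amtF t x y s g) := by
  intro g
  induction g with
  | zero => intro h s _ _; rw [amtF_zero]; simp [specGap]
  | succ g ih =>
    intro h s hs hst
    simp only [specGap]
    by_cases hh : h < maximum
    · rw [show (if maximum < h then maximum else h) = h from by split_ifs <;> omega, if_pos hh]
      have hshift := amtF_shift t x y s ht hs hst g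
      have hone := amtF_one t x y s ht hs hst
      by_cases hbon : s + 1 = t
      · rw [if_pos hbon]
        rw [ih (h + x + y) 0 le_rfl (by omega)]
        rw [hshift, hone, if_pos hbon, if_pos hbon]
        ring_nf
      · rw [if_neg hbon]
        rw [ih (h + x) (s + 1) (by omega) (by omega)]
        rw [hshift, hone, if_neg hbon, if_neg hbon]
        ring_nf
    · have hcl : (if maximum < h then maximum else h) = maximum := by split_ifs <;> omega
      rw [hcl, if_neg (lt_irrefl maximum), specGap_max]
      have := amtF_nonneg t x y s ht hx hy (g + 1)
      omega

-- the attack-free segment of A's loop follows specGap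
lemma gap_lemma (bandage : List Int) (maximum : Int) (attacks : List (List Int))
    (t x y : Int)
    (hb0 : (PySem.List.pyGet? bandage 0).getD 0 = t)
    (hb1 : (PySem.List.pyGet? bandage 1).getD 0 = x)
    (hb2 : (PySem.List.pyGet? bandage 2).getD 0 = y)
    (monster tcur : Int)
    (hT : (PySem.List.pyGet? ((PySem.List.pyGet? attacks monster).getD []) 0).getD 0 = tcur) :
    ∀ (g : Nat) (sec h s : Int) (rest : List Int),
      (tcur < sec ∨ sec + g ≤ tcur) →
      ∃ s', solGoA bandage maximum attacks (PySem.List.pyRange sec (sec + g) 1 ++ rest) h s monster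
          = solGoA bandage maximum attacks rest (specGap maximum t x y g h s) s' monster := by
  intro g
  induction g with
  | zero =>
    intro sec h s rest _
    refine ⟨s, ?_⟩
    rw [show sec + ((0 : Nat) : Int) = sec from by simp, PySem.List.pyRange_one_eq_nil le_rfl]
    rfl
  | succ g ih =>
    intro sec h s rest hcond
    have hcond' : tcur < sec ∨ sec + ((g : Int) + 1) ≤ tcur := by
      push_cast at hcond; omega
    have hne : ¬ sec = tcur := by omega
    rw [show sec + ((g + 1 : Nat) : Int) = sec + ((g : Int) + 1) from by push_cast; ring,
      PySem.List.pyRange_one_cons (by omega : sec < sec + ((g : Int) + 1)), List.cons_append]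
    simp only [solGoA, specGap]
    rw [hT, if_neg hne, hb0, hb1, hb2,
      show sec + ((g : Int) + 1) = (sec + 1) + (g : Int) from by ring]
    have hcond3 : tcur < sec + 1 ∨ (sec + 1) + ((g : Nat) : Int) ≤ tcur := by omega
    by_cases hcl : (if maximum < h then maximum else h) < maximum
    · rw [if_pos hcl, if_pos hcl]
      by_cases hbon : s + 1 = t
      · rw [if_pos hbon, if_pos hbon]
        exact ih (sec + 1) _ 0 rest hcond3
      · rw [if_neg hbon, if_neg hbon]
        exact ih (sec + 1) _ (s + 1) rest hcond3
    · rw [if_neg hcl, if_neg hcl]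
      exact ih (sec + 1) _ s rest hcond3

lemma pvGet0_headD (xs : List Int) : (PySem.List.pyGet? xs 0).getD 0 = xs.headD 0 := by
  cases xs with
  | nil => rfl
  | cons a l => rw [PySem.List.pyGet?_zero_cons]; rfl

-- A's loop never matched: at full health and with the current attack's time outside the
-- scanned seconds, every iteration leaves the state unchanged
lemma noattack_lemma (bandage : List Int) (maximum : Int) (attacks : List (List Int))
    (monster tcur : Int)
    (hT : (PySem.List.pyGet? ((PySem.List.pyGet? attacks monster).getD []) 0).getD 0 = tcur) :
    ∀ (secs : List Int) (s : Int), (∀ sec ∈ secs, sec ≠ tcur) →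
      solGoA bandage maximum attacks secs maximum s monster = maximum := by
  intro secs
  induction secs with
  | nil => intro s _; rfl
  | cons sec rest ih =>
    intro s hmem
    simp only [solGoA]
    rw [if_neg (lt_irrefl maximum), hT,
      if_neg (hmem sec (by simp)), if_neg (lt_irrefl maximum)]
    exact ih s (fun z hz => hmem z (by simp [hz]))

-- B's heal agrees with the clamped closed form on the stated domain
lemma healAlt_eq (bandage : List Int) (t x y : Int)
    (hb0 : (PySem.List.pyGet? bandage 0).getD 0 = t)
    (hb1 : (PySem.List.pyGet? bandage 1).getD 0 = x)
    (hb2 : (PySem.List.pyGet? bandage 2).getD 0 = y)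
    (ht : 1 ≤ t) (hx : 0 ≤ x) (hy : 0 ≤ y)
    (h maximum gap : Int) (hh : h ≤ maximum) (hg : 0 ≤ gap) :
    healAlt bandage h maximum gap = min maximum (h + (gap * x + gap / t * y)) := by
  unfold healAlt
  rw [hb0, hb1, hb2, PySem.Int.floordiv_eq_ediv_of_pos (by omega : (0 : Int) < t)]
  have hamt : 0 ≤ gap * x + gap / t * y := by
    have h1 : 0 ≤ gap * x := mul_nonneg hg hx
    have h2 : 0 ≤ gap / t := Int.ediv_nonneg hg (by omega)
    have h3 : 0 ≤ gap / t * y := mul_nonneg h2 hy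
    omega
  by_cases hc : gap ≤ 0 ∨ maximum ≤ h
  · rw [if_pos hc]
    rcases hc with hc | hc
    · have : gap = 0 := by omega
      subst this
      simp only [zero_mul, Int.zero_ediv, add_zero]
      omega
    · omega
  · rw [if_neg hc]
    ring_nf

lemma main_lemma (bandage : List Int) (maximum L t x y : Int) (attacks : List (List Int))
    (ht : 1 ≤ t) (hx : 0 ≤ x) (hy : 0 ≤ y)
    (hb0 : (PySem.List.pyGet? bandage 0).getD 0 = t)
    (hb1 : (PySem.List.pyGet? bandage 1).getD 0 = x)
    (hb2 : (PySem.List.pyGet? bandage 2).getD 0 = y) :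
    ∀ (rest : List (List Int)) (i : Nat) (prev h : Int),
      attacks.drop i = rest →
      (rest = [] → L < prev) →
      (∀ a ∈ rest, 2 ≤ a.length ∧ 0 ≤ (a.drop 1).headD 0) →
      (rest ≠ [] → prev ≤ (rest.headD []).headD 0) →
      List.Pairwise (fun a b => a.headD 0 < b.headD 0) rest →
      (∀ hne : rest ≠ [], (rest.getLast hne).headD 0 = L) →
      0 ≤ prev → h ≤ maximum →
      solGoA bandage maximum attacks (PySem.List.pyRange prev (L + 1) 1) h 0 (i : Int)
        = altGo bandage maximum L rest h prev := by
  intro rest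
  induction rest with
  | nil =>
    intro i prev h _ hemp _ _ _ _ _ _
    rw [PySem.List.pyRange_one_eq_nil (by have := hemp rfl; omega)]
    show h = healAlt bandage h maximum (L - prev + 1)
    unfold healAlt
    rw [if_pos (Or.inl (by have := hemp rfl; omega))]
  | cons atk rest' ih =>
    intro i prev h hdrop _ hshape hhead hpair hlast hprev0 hhm
    have hne : (atk :: rest') ≠ [] := by simp
    obtain ⟨time, damage, tl, hatk⟩ : ∃ a b tl, atk = a :: b :: tl := by
      have h2 := (hshape atk (by simp)).1
      match atk, h2 with
      | a :: b :: tl, _ => exact ⟨a, b, tl, rfl⟩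
    have hdmg : 0 ≤ damage := by
      have := (hshape atk (by simp)).2
      rw [hatk] at this
      simpa using this
    have hgi : attacks[i]? = some atk := by
      have h0 : (attacks.drop i)[0]? = some atk := by rw [hdrop]; rfl
      rwa [List.getElem?_drop, Nat.add_zero] at h0
    have hAtk : (PySem.List.pyGet? attacks (i : Int)).getD [] = atk := by
      rw [PySem.List.pyGet?_natCast, hgi]; rfl
    have hT : (PySem.List.pyGet? ((PySem.List.pyGet? attacks (i : Int)).getD []) 0).getD 0
        = time := by rw [hAtk, hatk, PySem.List.pyGet?_zero_cons]; rfl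
    have hTloc : (PySem.List.pyGet? atk 0).getD 0 = time := by
      rw [hatk, PySem.List.pyGet?_zero_cons]; rfl
    have hD : (PySem.List.pyGet? atk 1).getD 0 = damage := by
      rw [hatk]
      rw [show (1 : Int) = ((1 : Nat) : Int) from rfl, PySem.List.pyGet?_natCast]
      rfl
    have hprevtime : prev ≤ time := by
      have := hhead hne
      rw [List.headD_cons, hatk] at this
      simpa using this
    have htimeL : time ≤ L := by
      rcases List.eq_nil_or_concat rest' with h0 | ⟨_, _, _⟩
      · subst h0
        have := hlast hne
        rw [List.getLast_singleton] at this
        rw [hatk] at this; simp at this; omega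
      case inr h0 =>
        have hne' : rest' ≠ [] := by rcases h0 with ⟨l, b, rfl⟩; simp
        have hmem : rest'.getLast hne' ∈ rest' := List.getLast_mem hne'
        have hlt : atk.headD 0 < (rest'.getLast hne').headD 0 :=
          (List.pairwise_cons.mp hpair).1 _ hmem
        have hlv : (rest'.getLast hne').headD 0 = L := by
          have := hlast hne
          rwa [List.getLast_cons hne'] at this
        rw [hatk] at hlt; simp only [List.headD_cons] at hlt; omega
    -- split the range at the attack second
    set g : Nat := (time - prev).toNat with hg
    have h1 : prev + (g : Int) = time := by omega
    have hsplit : PySem.List.pyRange prev (L + 1) 1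
        = PySem.List.pyRange prev (prev + (g : Int)) 1
          ++ (time :: PySem.List.pyRange (time + 1) (L + 1) 1) := by
      rw [h1, PySem.List.pyRange_one_append prev time (L + 1) (by omega) (by omega),
        PySem.List.pyRange_one_cons (by omega : time < L + 1)]
    rw [hsplit]
    obtain ⟨s', he⟩ := gap_lemma bandage maximum attacks t x y hb0 hb1 hb2
      (i : Int) time hT g prev h 0 (time :: PySem.List.pyRange (time + 1) (L + 1) 1)
      (Or.inr (by omega))
    rw [he]
    simp only [solGoA]
    rw [hT, if_pos rfl, hAtk, hD]
    have hclamp : (if maximum < specGap maximum t x y g h 0 then maximum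
        else specGap maximum t x y g h 0) = min maximum (specGap maximum t x y g h 0) := by
      rcases min_choice maximum (specGap maximum t x y g h 0) with hmc | hmc <;>
        (rw [hmc]; split_ifs <;> omega)
    have hamt : amtF t x y 0 g = (time - prev) * x + (time - prev) / t * y := by
      unfold amtF
      rw [show ((g : Nat) : Int) = time - prev from by omega]
      simp
    have hclosed := clamp_gap maximum t x y ht hx hy g h 0 le_rfl (by omega)
    rw [hamt] at hclosed
    have hheal := healAlt_eq bandage t x y hb0 hb1 hb2 ht hx hy h maximum (time - prev)
      hhm (by omega)
    -- B's step
    show _ = altGo bandage maximum L (atk :: rest') h prev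
    simp only [altGo]
    rw [if_neg (by omega : ¬ L < prev), hTloc,
      if_neg (by omega : ¬ (time < prev ∨ L < time)), hD, hheal, ← hclosed, hclamp]
    set hv := min maximum (specGap maximum t x y g h 0) - damage with hhv
    by_cases hdead : hv ≤ 0
    · rw [if_pos hdead, if_pos hdead]
    · rw [if_neg hdead, if_neg hdead]
      have hdrop' : attacks.drop (i + 1) = rest' := by
        rw [← List.tail_drop, ‹attacks.drop i = atk :: rest'›]; rfl
      have hpair' := (List.pairwise_cons.mp hpair).2
      have hrec := ih (i + 1) (time + 1) hv hdrop'
        (by intro hnil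
            subst hnil
            have := hlast hne
            rw [List.getLast_singleton] at this
            rw [hatk] at this; simp at this; omega)
        (fun a ha => hshape a (by simp [ha]))
        (by intro hne'
            have hlt : atk.headD 0 < (rest'.headD []).headD 0 := by
              have hm : rest'.headD [] ∈ rest' := by
                cases rest' with
                | nil => exact absurd rfl hne'
                | cons b l => simp
              exact (List.pairwise_cons.mp hpair).1 _ hm
            rw [hatk] at hlt; simp only [List.headD_cons] at hlt; omega)
        hpair'
        (by intro hne'
            have := hlast hne
            rwa [List.getLast_cons hne'] at this)
        (by omega)
        (by omega)
      rw [show ((i : Int) + 1) = ((i + 1 : Nat) : Int) from by push_cast; ring]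
      exact hrec

-- ===== VERDICT (by name: the statement is the Claim_ definition above) =====
theorem solution_spec : Claim_equal_solution := by
  intro bandage health attacks _ hpre
  obtain ⟨hane, hlastne, hbranch⟩ := hpre
  obtain ⟨f, atts, rfl⟩ : ∃ f atts, attacks = f :: atts := by
    match attacks, hane with | f :: atts, _ => exact ⟨f, atts, rfl⟩
  have hne : (f :: atts) ≠ [] := by simp
  unfold Spec_solution solution solution_alt
  have hlastget : (PySem.List.pyGet? (f :: atts) (-1)).getD [] = (f :: atts).getLast hne := by
    rw [PySem.List.pyGet?_neg_one, List.getLast?_eq_some_getLast hne]; rfl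
  have hlq : (f :: atts).getLast?.getD [] = (f :: atts).getLast hne := by
    rw [List.getLast?_eq_some_getLast hne]; rfl
  set L := (PySem.List.pyGet? ((PySem.List.pyGet? (f :: atts) (-1)).getD []) 0).getD 0 with hL
  show solGoA bandage health (f :: atts) (PySem.List.pyRange 0 (L + 1) 1) health 0 0
    = altGo bandage health L (f :: atts) health 0
  have hLv : L = ((f :: atts).getLast?.getD []).headD 0 := by
    rw [hL, hlastget, pvGet0_headD, hlq]
  have hhead : (PySem.List.pyGet? (f :: atts) (0 : Int)).getD [] = f := by
    rw [PySem.List.pyGet?_zero_cons]; rfl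
  have hT0 : (PySem.List.pyGet? ((PySem.List.pyGet? (f :: atts) (0 : Int)).getD []) 0).getD 0
      = f.headD 0 := by rw [hhead, pvGet0_headD]
  rcases hbranch with hb1 | ⟨hfne, hb2⟩ | ⟨hfirst, hpair, hshape, hblen, ht, hx, hy⟩
  · -- last attack time negative: A's range is empty, B breaks before its first attack
    rw [PySem.List.pyRange_one_eq_nil (by omega : L + 1 ≤ 0)]
    show health = altGo bandage health L (f :: atts) health 0
    simp only [altGo]
    rw [if_pos (by omega : L < (0 : Int))]
    unfold healAlt
    rw [if_pos (Or.inl (by omega))]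
  · -- the first attack never lands: A stays at full health throughout, B breaks at it
    have ht0 : f.headD 0 < 0 ∨ L < f.headD 0 := by rw [hLv]; exact hb2
    rw [noattack_lemma bandage health (f :: atts) 0 (f.headD 0) hT0
      (PySem.List.pyRange 0 (L + 1) 1) 0
      (by intro sec hsec
          have := (PySem.List.mem_pyRange_one).mp hsec
          omega)]
    show health = altGo bandage health L (f :: atts) health 0
    simp only [altGo]
    by_cases hL0 : L < 0
    · rw [if_pos hL0]
      unfold healAlt
      rw [if_pos (Or.inl (by omega))]
    · rw [if_neg hL0, pvGet0_headD, if_pos (by omega : f.headD 0 < 0 ∨ L < f.headD 0)]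
      unfold healAlt
      rw [if_pos (Or.inr le_rfl)]
  · -- the problem's stated domain: one B step per attack, closed-form gaps
    have hb0 : (PySem.List.pyGet? bandage 0).getD 0 = bandage.headD 0 := pvGet0_headD bandage
    obtain ⟨t0, x0, y0, tl, hbsh⟩ : ∃ a b c tl, bandage = a :: b :: c :: tl := by
      match bandage, hblen with
      | a :: b :: c :: tl, _ => exact ⟨a, b, c, tl, rfl⟩
    have hb0' : (PySem.List.pyGet? bandage 0).getD 0 = t0 := by
      rw [hbsh, PySem.List.pyGet?_zero_cons]; rfl
    have hb1' : (PySem.List.pyGet? bandage 1).getD 0 = x0 := by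
      rw [hbsh, show (1 : Int) = ((1 : Nat) : Int) from rfl, PySem.List.pyGet?_natCast]; rfl
    have hb2' : (PySem.List.pyGet? bandage 2).getD 0 = y0 := by
      rw [hbsh, show (2 : Int) = ((2 : Nat) : Int) from rfl, PySem.List.pyGet?_natCast]; rfl
    have ht' : 1 ≤ t0 := by rw [hbsh] at ht; simpa using ht
    have hx' : 0 ≤ x0 := by rw [hbsh] at hx; simpa using hx
    have hy' : 0 ≤ y0 := by rw [hbsh] at hy; simpa using hy
    have hmain := main_lemma bandage health L t0 x0 y0 (f :: atts) ht' hx' hy'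
      hb0' hb1' hb2'
      (f :: atts) 0 0 health List.drop_zero (by simp) hshape
      (by intro _; exact hfirst) hpair
      (by intro hne'
          rw [hLv, hlq])
      le_rfl le_rfl
    rw [show ((0 : Nat) : Int) = (0 : Int) from rfl] at hmain
    exact hmain
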